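-- pv_equiv track=rewrite | github.com/ISIB-Group/inspursmsdk | inspur_sm_sdk/command/IpmiFunc.py | __hex2ascii
-- ===== SOURCE A (Python) =====
-- def __hex2ascii(data):
--     list_s = []
--     if data is not None and len(data) % 2 == 0:
--         if data == '':
--             return ''
--         # for i in range(0,len(data),2):
--         #     list_s.append(chr(int(data[i:i+2],16)))
--         i = 0
--         while (True):
--             hex_str = data[i:i + 2]
--             if '00' == hex_str:
--                 break
--             chr_str = chr(int(hex_str, 16))
--             list_s.append(chr_str)
--             i += 2
--             if i == len(data):
--                 break
--     hex_str = ''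
--     if list_s:
--         hex_str = ''.join(list_s).replace('\n', '').replace('\r', '')
--     return hex_str
-- ===== SOURCE B (Python) =====
-- def __hex2ascii(data):
--     # Two passes: locate the first aligned '00' terminator, then decode up to it.
--     if data is None or len(data) % 2:
--         return ''
--     cutoff = len(data)
--     for i in range(0, len(data), 2):
--         if data[i:i + 2] == '00':
--             cutoff = i
--             break
--     out = ''.join(chr(int(data[j:j + 2], 16)) for j in range(0, cutoff, 2))
--     return out.replace('\n', '').replace('\r', '')
-- ===== Notes on version B (the rewrite author's own statement) =====
-- stated objective: simpler
-- what changed: A's single while-True loop that interleaves the null-terminator check, decoding and list building is replaced by a locate-terminator pass followed by a direct join-of-decoded-pairs pass.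
import Mathlib
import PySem

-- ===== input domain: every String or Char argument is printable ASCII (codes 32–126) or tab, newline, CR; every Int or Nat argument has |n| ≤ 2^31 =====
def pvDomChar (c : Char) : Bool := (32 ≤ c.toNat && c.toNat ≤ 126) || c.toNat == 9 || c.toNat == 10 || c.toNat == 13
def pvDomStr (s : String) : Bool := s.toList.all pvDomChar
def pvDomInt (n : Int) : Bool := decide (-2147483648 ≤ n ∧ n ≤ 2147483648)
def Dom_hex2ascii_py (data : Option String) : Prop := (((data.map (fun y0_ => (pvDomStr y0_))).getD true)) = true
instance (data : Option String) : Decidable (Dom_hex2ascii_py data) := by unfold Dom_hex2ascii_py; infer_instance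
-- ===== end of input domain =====

-- B replaces A's single interleaved null-check-and-decode while-loop by a locate-terminator
-- pass followed by a decode-and-join pass (simpler decomposition; no speed claim).


-- chr(int(two-char slice, 16)): int(_,16) is PySem.Int.ofCharsBase?; chr raises ValueError on a
-- negative value (a two-char slice parses to at most 255, so chr's upper bound is unreachable);
-- none = ValueError
def hexPair? (c1 c2 : Char) : Option Nat :=
  match PySem.Int.ofCharsBase? [c1, c2] 16 with
  | some n => if 0 ≤ n then some n.toNat else none
  | none => none

-- ===== PORT A =====
-- A's while-True loop at even index i: slice data[i:i+2] = the next two chars of the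
-- remaining list; '00' == slice → break; else append chr(int(slice,16)), i += 2;
-- i == len(data) → break.  (On a ValueError — outside Pre_ — the loop result is cut short.)
def aLoop (acc : List Char) : List Char → List Char
  | c1 :: c2 :: rest =>
    if c1 = '0' ∧ c2 = '0' then acc
    else
      match hexPair? c1 c2 with
      | some n => aLoop (acc ++ [Char.ofNat n]) rest
      | none => acc
  | _ => acc

def hex2ascii_py (data : Option String) : String :=
  match data with
  | none => ""                                   -- guard fails, list_s = [], return ''
  | some s =>
    if s.toList.length % 2 = 0 then
      if s = "" then ""
      else
        let list_s := aLoop [] s.toList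
        if list_s = [] then ""
        else PySem.Str.replace (PySem.Str.replace (PySem.Str.join "" (list_s.map (fun c => String.ofList [c]))) "\n" "") "\r" ""
    else ""

-- ===== PORT B =====
-- first pass of Source B: the cutoff index (position of the first aligned '00', else len(data))
def bCut : List Char → Nat
  | '0' :: '0' :: _ => 0
  | _ :: _ :: rest => 2 + bCut rest
  | _ => 0

-- second pass of Source B: decode each pair of the prefix before the cutoff
def bDecode : List Char → List Char
  | c1 :: c2 :: rest =>
    (match hexPair? c1 c2 with
     | some n => Char.ofNat n :: bDecode rest
     | none => [])
  | _ => []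

def hex2ascii_py_alt (data : Option String) : String :=
  match data with
  | none => ""
  | some s =>
    let cs := s.toList
    if cs.length % 2 = 1 then ""
    else
      PySem.Str.replace (PySem.Str.replace (String.ofList (bDecode (cs.take (bCut cs)))) "\n" "") "\r" ""

-- ===== PRECONDITION & SPEC =====
-- Pre_ excludes exactly the strings on which A raises ValueError: some aligned pair before the
-- first '00' terminator is rejected by int(_,16) or parses to a negative value (which chr rejects).
def pairsHex : List Char → Bool
  | '0' :: '0' :: _ => true
  | c1 :: c2 :: rest => (hexPair? c1 c2).isSome && pairsHex rest
  | _ => true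

def Pre_hex2ascii_py (data : Option String) : Prop :=
  match data with
  | none => True
  | some s => s.toList.length % 2 = 1 ∨ pairsHex s.toList = true

instance (data : Option String) : Decidable (Pre_hex2ascii_py data) := by
  unfold Pre_hex2ascii_py
  cases data <;> infer_instance

def pvWitness_hex2ascii_py : Option String := some "48690a00ff"

def Spec_hex2ascii_py (data : Option String) (out : String) : Prop := out = hex2ascii_py_alt data
instance (data : Option String) (out : String) : Decidable (Spec_hex2ascii_py data out) := by unfold Spec_hex2ascii_py; infer_instance

-- ===== CLAIM (what is proved, stated in full; the proofs are below) =====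
def Claim_equal_hex2ascii_py : Prop := ∀ (data : Option String), Dom_hex2ascii_py data → Pre_hex2ascii_py data → Spec_hex2ascii_py data (hex2ascii_py data)

-- ===== LEMMAS AND PROOFS =====

-- ''.join of singleton strings is String.ofList of the char list
lemma join_singletons (l : List Char) :
    PySem.Str.join "" (l.map (fun c => String.ofList [c])) = String.ofList l := by
  apply String.toList_inj.mp
  simp only [PySem.Str.toList_join, List.map_map, String.toList_ofList]
  have h : (String.toList ∘ fun c => String.ofList [c]) = fun c : Char => [c] := by
    funext c; simp
  rw [h]
  exact PySem.Chars.join_nil_singletons l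

lemma replace_empty :
    PySem.Str.replace (PySem.Str.replace (String.ofList []) "\n" "") "\r" "" = "" := by decide

lemma bCut_cons (c1 c2 : Char) (rest : List Char) (h : ¬ (c1 = '0' ∧ c2 = '0')) :
    bCut (c1 :: c2 :: rest) = 2 + bCut rest := by
  rw [bCut.eq_def]
  split
  · rename_i heq; injection heq with h1 h2; injection h2 with h2 _; exact absurd ⟨h1, h2⟩ h
  · rename_i heq; injection heq with h1 h2; injection h2 with h2 h3; subst h1; subst h2; subst h3; rfl
  · rename_i hbad; exact absurd rfl (hbad c1 c2 rest)

-- A's accumulator loop equals B's cut-then-decode composition on hex-clean input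
lemma pairsHex_cons (c1 c2 : Char) (rest : List Char) (h : ¬ (c1 = '0' ∧ c2 = '0')) :
    pairsHex (c1 :: c2 :: rest) = ((hexPair? c1 c2).isSome && pairsHex rest) := by
  rw [pairsHex.eq_def]
  split
  · rename_i heq; injection heq with h1 h2; injection h2 with h2 _; exact absurd ⟨h1, h2⟩ h
  · rename_i heq; injection heq with h1 h2; injection h2 with h2 h3; subst h1; subst h2; subst h3; rfl
  · rename_i hbad; exact absurd rfl (hbad c1 c2 rest)

lemma aLoop_cons (acc : List Char) (c1 c2 : Char) (rest : List Char) (n : Nat)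
    (hne : ¬ (c1 = '0' ∧ c2 = '0')) (hp : hexPair? c1 c2 = some n) :
    aLoop acc (c1 :: c2 :: rest) = aLoop (acc ++ [Char.ofNat n]) rest := by
  rw [aLoop.eq_def]
  simp only [if_neg hne, hp]

lemma bDecode_cons (c1 c2 : Char) (l : List Char) (n : Nat) (hp : hexPair? c1 c2 = some n) :
    bDecode (c1 :: c2 :: l) = Char.ofNat n :: bDecode l := by
  rw [bDecode.eq_def]
  simp only [hp]

-- A's accumulator loop equals B's cut-then-decode composition on hex-clean input
lemma aLoop_eq_bDecode (cs : List Char) :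
    ∀ acc, pairsHex cs = true → aLoop acc cs = acc ++ bDecode (cs.take (bCut cs)) := by
  induction cs using bCut.induct with
  | case1 tail =>
    intro acc h
    rw [show bCut ('0' :: '0' :: tail) = 0 from rfl, List.take_zero,
        show bDecode ([] : List Char) = [] from rfl, List.append_nil]
    rfl
  | case2 c1 c2 rest hne ih =>
    intro acc h
    have hne' : ¬ (c1 = '0' ∧ c2 = '0') := by
      rintro ⟨rfl, rfl⟩; exact hne rfl rfl
    rw [pairsHex_cons c1 c2 rest hne', Bool.and_eq_true] at h
    obtain ⟨hc, hrest⟩ := h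
    obtain ⟨n, hp⟩ := Option.isSome_iff_exists.mp hc
    rw [bCut_cons c1 c2 rest hne']
    have htake : (c1 :: c2 :: rest).take (2 + bCut rest) = c1 :: c2 :: rest.take (bCut rest) := by
      simp [List.take, Nat.add_comm 2 (bCut rest)]
    rw [htake, bDecode_cons c1 c2 _ n hp, aLoop_cons acc c1 c2 rest n hne' hp,
        ih (acc ++ [Char.ofNat n]) hrest]
    simp
  | case3 x hx1 hx2 =>
    intro acc h
    match x, hx2 with
    | [], _ => simp [show aLoop acc ([] : List Char) = acc from rfl,
                     show bCut ([] : List Char) = 0 from rfl,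
                     show bDecode ([] : List Char) = [] from rfl]
    | [c], _ =>
      have h1 : aLoop acc [c] = acc := rfl
      have h2 : List.take (bCut [c]) [c] = [] ∨ List.take (bCut [c]) [c] = [c] := by
        cases bCut [c] with
        | zero => left; rfl
        | succ k => right; simp
      rcases h2 with h2 | h2 <;>
        rw [h1, h2] <;>
        simp [show bDecode ([] : List Char) = [] from rfl, show bDecode [c] = [] from rfl]
    | a::b::t, hh => exact absurd rfl (hh a b t)

-- ===== VERDICT (by name: the statement is the Claim_ definition above) =====
theorem hex2ascii_py_spec : Claim_equal_hex2ascii_py := by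
  intro data _hdom hpre
  unfold Spec_hex2ascii_py
  match data with
  | none => rfl
  | some s =>
    rcases hpre with hodd | hhex
    · simp only [hex2ascii_py, hex2ascii_py_alt, hodd]
      norm_num
    · by_cases hs : s = ""
      · subst hs; decide
      · have heven : s.toList.length % 2 = 0 ∨ s.toList.length % 2 = 1 := by omega
        rcases heven with he | ho
        · have hloop := aLoop_eq_bDecode s.toList [] hhex
          simp only [List.nil_append] at hloop
          simp only [hex2ascii_py, hex2ascii_py_alt, he, if_neg hs]
          rw [hloop]
          by_cases hn : bDecode (s.toList.take (bCut s.toList)) = []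
          · simp only [hn]
            norm_num
            exact (replace_empty).symm
          · simp only [if_neg hn]
            rw [join_singletons]
            norm_num
        · simp only [hex2ascii_py, hex2ascii_py_alt, ho]
          norm_num
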